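-- pv_equiv track=rewrite | github.com/MarginalCentrality/IJCAI-2023-NEP | RL-Pretraining-NEP-AM/utils/analyze_ls_results.py | get_n_diff_optimal_sols
-- ===== SOURCE A (Python) =====
-- def get_n_diff_optimal_sols(imp_sols):
--     """
--     Args:
--         imp_sols: [... [robustness, sol] ...]
--
--     Returns: Number of different optimal solutions.
--     """
--
--     def get_normalized_repr(sol):
--         """
--
--         Args:
--             sol: [u_{1}, u_{1'} ,..., u_{2m}, u_{2m'}]
--
--         Returns:
--         """
--         assert len(sol) % 2 == 0, 'Length of the solution is not an even number~'
--         edge_pairs = []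
--         for i in range(0, len(sol), 2):
--             u, v = sol[i], sol[i + 1]
--             edge_pair = (u, v) if u < v else (v, u)
--             edge_pairs.append(edge_pair)
--
--         edge_pairs.sort()
--
--         return '-'.join(['-'.join([str(edge_pair[0]), str(edge_pair[1])]) for edge_pair in edge_pairs])
--
--     largest_robustness = max([imp_sol[0] for imp_sol in imp_sols])
--
--     best_sol = set()
--     for robustness, sol in imp_sols:
--         if robustness == largest_robustness:
--             best_sol.add(get_normalized_repr(sol))
--
--     return len(best_sol)
-- ===== SOURCE B (Python) =====
-- def get_n_diff_optimal_sols(imp_sols):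
--     """Sort-then-scan distinct count of normalized optimal-solution representations."""
--
--     def get_normalized_repr(sol):
--         assert len(sol) % 2 == 0, 'Length of the solution is not an even number~'
--         pairs = sorted((sol[i], sol[i + 1]) if sol[i] < sol[i + 1] else (sol[i + 1], sol[i])
--                        for i in range(0, len(sol), 2))
--         return '-'.join(str(u) + '-' + str(v) for u, v in pairs)
--
--     largest_robustness = imp_sols[0][0]
--     for robustness, _ in imp_sols[1:]:
--         if robustness > largest_robustness:
--             largest_robustness = robustness
--
--     reprs = []
--     for robustness, sol in imp_sols:
--         if robustness == largest_robustness: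
--             reprs.append(get_normalized_repr(sol))
--
--     reprs.sort()
--     count = 0
--     prev = None
--     for r in reprs:
--         if r != prev:
--             count += 1
--             prev = r
--     return count
-- ===== Notes on version B (the rewrite author's own statement) =====
-- stated objective: alternative
-- what changed: B replaces A's max() builtin by a running-maximum loop and replaces hash-set deduplication of the optimal representations by collecting them in a list, sorting it, and counting distinct values in one adjacent-comparison scan.
-- outside the precondition, e.g. on get_n_diff_optimal_sols([]): A raises ValueError, B raises IndexError
import Mathlib
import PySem

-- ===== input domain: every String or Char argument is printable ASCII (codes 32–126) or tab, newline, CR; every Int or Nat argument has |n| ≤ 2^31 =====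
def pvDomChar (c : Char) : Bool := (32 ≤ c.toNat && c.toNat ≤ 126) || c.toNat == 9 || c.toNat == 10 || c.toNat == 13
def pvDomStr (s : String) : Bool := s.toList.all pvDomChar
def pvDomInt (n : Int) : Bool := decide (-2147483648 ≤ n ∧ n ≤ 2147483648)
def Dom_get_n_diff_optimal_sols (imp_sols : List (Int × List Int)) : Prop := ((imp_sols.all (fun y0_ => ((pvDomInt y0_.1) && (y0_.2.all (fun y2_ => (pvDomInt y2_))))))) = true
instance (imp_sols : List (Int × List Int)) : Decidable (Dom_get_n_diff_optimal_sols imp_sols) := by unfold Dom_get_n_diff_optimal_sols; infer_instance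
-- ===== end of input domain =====

-- B replaces max() by a running-maximum loop and set-based deduplication of the optimal
-- representations by sort-then-adjacent-scan distinct counting (objective: alternative).

-- ===== PORT A =====
-- get_normalized_repr as in A: build edge pairs in a loop, sort in place, nested joins.
def pvNormReprA (sol : List Int) : String :=
  let edge_pairs : List (Int × Int) :=
    (PySem.List.pyRange 0 (sol.length : Int) 2).foldl (fun acc i =>
      let u := PySem.List.pyGetD sol i 0
      let v := PySem.List.pyGetD sol (i + 1) 0
      acc ++ [if u < v then (u, v) else (v, u)]) []
  let sorted_pairs := PySem.List.sorted2 edge_pairs (fun p => p.1) (fun p => p.2)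
  PySem.Str.join "-" (sorted_pairs.map (fun p =>
    PySem.Str.join "-" [PySem.Int.toStr p.1, PySem.Int.toStr p.2]))

def get_n_diff_optimal_sols (imp_sols : List (Int × List Int)) : Int :=
  match PySem.List.max? (imp_sols.map (fun p => p.1)) (fun x => x) with
  | none => 0   -- Python raises ValueError on max([]) ; excluded by Pre_
  | some largest_robustness =>
    let best_sol : PySem.Set String :=
      imp_sols.foldl (fun s p =>
        if p.1 == largest_robustness then PySem.Set.add s (pvNormReprA p.2) else s)
        PySem.Set.empty
    PySem.Set.len best_sol

-- ===== PORT B =====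
-- get_normalized_repr as in B: sorted() of a pair comprehension, join of "u-v" strings.
def pvNormReprB (sol : List Int) : String :=
  let pairs := PySem.List.sorted2
    ((PySem.List.pyRange 0 (sol.length : Int) 2).map (fun i =>
      if PySem.List.pyGetD sol i 0 < PySem.List.pyGetD sol (i + 1) 0
      then (PySem.List.pyGetD sol i 0, PySem.List.pyGetD sol (i + 1) 0)
      else (PySem.List.pyGetD sol (i + 1) 0, PySem.List.pyGetD sol i 0)))
    (fun p => p.1) (fun p => p.2)
  PySem.Str.join "-" (pairs.map (fun p => PySem.Int.toStr p.1 ++ "-" ++ PySem.Int.toStr p.2))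

def get_n_diff_optimal_sols_alt (imp_sols : List (Int × List Int)) : Int :=
  match imp_sols with
  | [] => 0   -- Python raises IndexError on imp_sols[0] ; excluded by Pre_
  | p0 :: rest =>
    let largest_robustness := rest.foldl (fun m q => if q.1 > m then q.1 else m) p0.1
    let reprs : List String :=
      (p0 :: rest).foldl (fun acc q =>
        if q.1 == largest_robustness then acc ++ [pvNormReprB q.2] else acc) []
    let rs := PySem.List.sorted reprs (fun r => r)
    (rs.foldl (fun (st : Int × Option String) r =>
        if st.2 == some r then st else (st.1 + 1, some r)) (0, (none : Option String))).1

-- ===== PRECONDITION & SPEC =====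
-- Pre_ excludes exactly the inputs on which Python A raises: the empty list (max([]) is a
-- ValueError) and inputs where some maximal-robustness solution has odd length (A's assert
-- fires); B raises on those inputs as well (IndexError resp. AssertionError).
def Pre_get_n_diff_optimal_sols (imp_sols : List (Int × List Int)) : Prop :=
  imp_sols ≠ [] ∧
  ∀ p ∈ imp_sols, (∀ q ∈ imp_sols, q.1 ≤ p.1) → p.2.length % 2 = 0
instance (imp_sols : List (Int × List Int)) : Decidable (Pre_get_n_diff_optimal_sols imp_sols) := by
  unfold Pre_get_n_diff_optimal_sols; infer_instance

def pvWitness_get_n_diff_optimal_sols : (List (Int × List Int)) := [(1, [2, 1]), (0, [3])]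

def Spec_get_n_diff_optimal_sols (imp_sols : List (Int × List Int)) (out : Int) : Prop := out = get_n_diff_optimal_sols_alt imp_sols
instance (imp_sols : List (Int × List Int)) (out : Int) : Decidable (Spec_get_n_diff_optimal_sols imp_sols out) := by unfold Spec_get_n_diff_optimal_sols; infer_instance

-- ===== CLAIM (what is proved, stated in full; the proofs are below) =====
def Claim_equal_get_n_diff_optimal_sols : Prop := ∀ (imp_sols : List (Int × List Int)), Dom_get_n_diff_optimal_sols imp_sols → Pre_get_n_diff_optimal_sols imp_sols → Spec_get_n_diff_optimal_sols imp_sols (get_n_diff_optimal_sols imp_sols)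

-- ===== LEMMAS AND PROOFS =====

-- '-'.join of two strings, written out.
theorem pvJoin_pair (a b : String) : PySem.Str.join "-" [a, b] = a ++ "-" ++ b := by
  apply String.toList_inj.mp
  simp [PySem.Str.join, PySem.Chars.join, List.intercalate, List.intersperse]

-- The two normalizers build the same string.
theorem pvNormRepr_eq (sol : List Int) : pvNormReprB sol = pvNormReprA sol := by
  simp only [pvNormReprA, pvNormReprB, PySem.List.foldl_append_singleton_eq_map,
    List.nil_append, pvJoin_pair]

-- B's running-maximum loop computes max() of the robustness values.
theorem pvLargest_eq (p0 : Int × List Int) (rest : List (Int × List Int)) :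
    PySem.List.max? ((p0 :: rest).map (fun p => p.1)) (fun x => x)
      = some (rest.foldl (fun m q => if q.1 > m then q.1 else m) p0.1) := by
  rw [List.map_cons, PySem.List.max?_id_cons]
  simp only [List.foldl_map]
  have hf : (fun (m : Int) (q : Int × List Int) => if q.1 > m then q.1 else m)
      = fun (m : Int) (q : Int × List Int) => max m q.1 := by
    funext m q
    by_cases h : q.1 > m <;> simp [h, max_def] <;> omega
  rw [hf]

-- A's conditional Set.add loop is set-update by the filtered, normalized list.
theorem pvSetFold_eq (L : Int) (l : List (Int × List Int)) (s : PySem.Set String) :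
    l.foldl (fun s p => if p.1 == L then PySem.Set.add s (pvNormReprA p.2) else s) s
      = PySem.Set.update s ((l.filter (fun p => p.1 == L)).map (fun p => pvNormReprA p.2)) := by
  induction l generalizing s with
  | nil => rfl
  | cons a t ih =>
      rw [List.foldl_cons, List.filter_cons]
      by_cases h : (a.1 == L) = true
      · rw [if_pos h, if_pos h, ih, List.map_cons]
        rfl
      · rw [if_neg h, if_neg h, ih]

theorem pvCardInsert (a : String) (s : Finset String) :
    (insert a s).card = (s.erase a).card + 1 := by
  rw [← Finset.insert_erase (Finset.mem_insert_self a s), Finset.erase_insert_eq_erase,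
      Finset.card_insert_of_notMem (Finset.notMem_erase a s)]

-- The adjacent-comparison scan on a nondecreasing list counts its distinct values.
theorem pvScan_count (l : List String) (c : Int) (prev : Option String)
    (hs : l.Pairwise (· ≤ ·))
    (hp : ∀ x ∈ l, ∀ p, prev = some p → p ≤ x) :
    (l.foldl (fun (st : Int × Option String) r =>
        if st.2 == some r then st else (st.1 + 1, some r)) (c, prev)).1
      = c + ((l.toFinset \ (prev.elim ∅ ({·}))).card : Int) := by
  induction l generalizing c prev with
  | nil => simp
  | cons a t ih =>
      rw [List.pairwise_cons] at hs
      obtain ⟨ha, ht⟩ := hs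
      rw [List.foldl_cons]
      by_cases h : prev = some a
      · subst h
        rw [show ((some a : Option String) == some a) = true by simp, if_pos rfl]
        rw [ih c (some a) ht (by intro x hx p hp'; cases hp'; exact ha x hx)]
        congr 2
        simp only [Option.elim, List.toFinset_cons, Finset.sdiff_singleton_eq_erase,
          Finset.erase_insert_eq_erase]
      · have hne : (prev == some a) = false := by
          cases prev with
          | none => rfl
          | some p => simpa using fun hpa => h (by rw [hpa])
        rw [hne, if_neg (by simp)]
        rw [ih (c + 1) (some a) ht (by intro x hx p hp'; cases hp'; exact ha x hx)]
        have hDrop : (t.toFinset : Finset String) \ (prev.elim ∅ ({·})) = t.toFinset := by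
          cases prev with
          | none => simp
          | some p =>
              have hpa : p ≤ a := hp a (List.mem_cons_self) p rfl
              have hplt : p < a := lt_of_le_of_ne hpa (fun e => h (by rw [e]))
              have hpt : p ∉ t.toFinset := by
                intro hmem
                exact absurd (ha p (List.mem_toFinset.mp hmem)) (not_le.mpr hplt)
              simp only [Option.elim, Finset.sdiff_singleton_eq_erase]
              exact Finset.erase_eq_of_notMem hpt
        have hIns : (a :: t).toFinset \ (prev.elim ∅ ({·}))
            = insert a (t.toFinset \ (prev.elim ∅ ({·}))) := by
          rw [List.toFinset_cons]
          apply Finset.insert_sdiff_of_notMem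
          cases prev with
          | none => simp
          | some p => simpa using fun e => h (by rw [e])
        rw [hIns, hDrop, pvCardInsert, ← Finset.sdiff_singleton_eq_erase]
        simp only [Option.elim]
        push_cast
        ring

-- ===== VERDICT (by name: the statement is the Claim_ definition above) =====
theorem get_n_diff_optimal_sols_spec : Claim_equal_get_n_diff_optimal_sols := by
  intro imp_sols _ hpre
  unfold Spec_get_n_diff_optimal_sols
  obtain ⟨hne, -⟩ := hpre
  obtain ⟨p0, rest, rfl⟩ := List.exists_cons_of_ne_nil hne
  unfold get_n_diff_optimal_sols get_n_diff_optimal_sols_alt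
  rw [pvLargest_eq]
  set L := rest.foldl (fun m q => if q.1 > m then q.1 else m) p0.1 with hL
  simp only [pvSetFold_eq, PySem.List.foldl_append_if, List.nil_append, pvNormRepr_eq]
  set F := ((p0 :: rest).filter (fun p => p.1 == L)).map (fun p => pvNormReprA p.2) with hF
  rw [pvScan_count _ 0 none
    (by simpa using PySem.List.sorted_pairwise F (fun r => r))
    (by intro x _ p hp'; cases hp')]
  have hperm : (PySem.List.sorted F (fun r => r)).toFinset = F.toFinset :=
    List.toFinset_eq_of_perm _ _ (PySem.List.sorted_perm F (fun r => r) false)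
  have hofl : (PySem.Set.ofList F).toFinset = F.toFinset := by
    apply Finset.ext
    intro x
    simp [PySem.Set.mem_ofList]
  have hlen : PySem.Set.len (PySem.Set.update PySem.Set.empty F) = (F.toFinset.card : Int) := by
    rw [show PySem.Set.update PySem.Set.empty F = PySem.Set.ofList F from
      (PySem.Set.ofList_eq_foldl F).symm]
    rw [← hofl, List.toFinset_card_of_nodup (PySem.Set.nodup_ofList F)]
    simp [PySem.Set.len]
  rw [hlen, hperm]
  simp
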